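-- pv_equiv track=rewrite | github.com/Piasy/HikBoxPictures | hikbox_pictures/face_review_pipeline.py | _build_cluster_cannot_link_pairs
-- ===== SOURCE A (Python) =====
-- from collections import Counter, defaultdict
-- from itertools import combinations
-- from typing import Any, Iterator
--
-- def _build_cluster_cannot_link_pairs(clusters: list[dict[str, Any]]) -> set[tuple[int, int]]:
--     if len(clusters) <= 1:
--         return set()
--
--     photo_to_cluster_indices: dict[str, list[int]] = defaultdict(list)
--     for idx, cluster in enumerate(clusters):
--         seen_photos: set[str] = set()
--         for member in cluster.get("members", []):
--             photo_relpath = str(member.get("photo_relpath", ""))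
--             if photo_relpath:
--                 seen_photos.add(photo_relpath)
--         for photo in seen_photos:
--             photo_to_cluster_indices[photo].append(idx)
--
--     cannot_link_pairs: set[tuple[int, int]] = set()
--     for indices in photo_to_cluster_indices.values():
--         if len(indices) <= 1:
--             continue
--         sorted_indices = sorted(set(indices))
--         for left, right in combinations(sorted_indices, 2):
--             cannot_link_pairs.add((int(left), int(right)))
--     return cannot_link_pairs
-- ===== SOURCE B (Python) =====
-- def _build_cluster_cannot_link_pairs(clusters):
--     # Transposed strategy: no photo->indices index is built; instead each cluster's
--     # photo set is precomputed once, and for each photo the holding clusters are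
--     # found by a direct membership scan over those per-cluster sets.
--     cluster_photos = [
--         {p for p in (str(m.get("photo_relpath", "")) for m in c.get("members", [])) if p}
--         for c in clusters
--     ]
--     all_photos = set()
--     for ps in cluster_photos:
--         all_photos |= ps
--     pairs = set()
--     for photo in all_photos:
--         holders = [i for i, ps in enumerate(cluster_photos) if photo in ps]
--         for a, left in enumerate(holders):
--             for right in holders[a + 1:]:
--                 pairs.add((left, right))
--     return pairs
-- ===== Notes on version B (the rewrite author's own statement) =====
-- stated objective: alternative
-- what changed: B builds no photo->cluster-indices inverted index: it precomputes each cluster's photo set once, takes the union of all photos, and for each photo finds the holding clusters by a direct membership scan over the per-cluster sets, emitting the index pairs directly (no itertools.combinations, no sorted(set(...)), no length guard).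
import Mathlib
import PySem

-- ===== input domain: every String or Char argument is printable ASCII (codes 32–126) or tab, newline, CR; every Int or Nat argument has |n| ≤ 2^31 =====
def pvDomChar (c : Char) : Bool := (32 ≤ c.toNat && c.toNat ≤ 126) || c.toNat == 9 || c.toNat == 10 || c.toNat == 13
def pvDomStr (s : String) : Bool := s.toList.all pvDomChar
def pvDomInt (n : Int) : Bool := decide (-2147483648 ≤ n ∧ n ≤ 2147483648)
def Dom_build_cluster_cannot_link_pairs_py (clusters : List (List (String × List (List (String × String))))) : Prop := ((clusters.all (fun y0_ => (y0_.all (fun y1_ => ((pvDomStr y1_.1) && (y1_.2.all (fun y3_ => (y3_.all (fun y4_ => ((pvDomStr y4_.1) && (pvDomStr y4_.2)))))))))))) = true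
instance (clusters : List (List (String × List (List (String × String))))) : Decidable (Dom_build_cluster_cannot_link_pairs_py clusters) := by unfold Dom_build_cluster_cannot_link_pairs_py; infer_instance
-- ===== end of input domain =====

-- B drops A's inverted photo->cluster-indices index entirely: it precomputes each cluster's photo
-- set once, unions them, and for each photo finds the holding clusters by a membership scan over
-- the per-cluster sets, emitting pairs directly. Objective: alternative (transposed data layout).
-- Both return a Python set; the equality proved is about the returned value.

-- shared dict lookups (both Pythons do cluster.get("members", []) / str(member.get("photo_relpath", "")))
def pvMembers (c : List (String × List (List (String × String)))) : List (List (String × String)) :=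
  PySem.Dict.getD (PySem.Dict.mk c) "members" []

def pvPhoto (m : List (String × String)) : String :=
  PySem.Dict.getD (PySem.Dict.mk m) "photo_relpath" ""

-- ===== PORT A =====
-- itertools.combinations(l, 2), in order
def pvCombs2 (l : List Int) : List (Int × Int) :=
  match l with
  | [] => []
  | x :: xs => xs.map (fun y => (x, y)) ++ pvCombs2 xs

-- seen_photos accumulation loop of A
def pvSeenStep (s : PySem.Set String) (member : List (String × String)) : PySem.Set String :=
  let photo := pvPhoto member
  if photo ≠ "" then PySem.Set.add s photo else s

def pvSeenFrom (s : PySem.Set String) (ms : List (List (String × String))) : PySem.Set String :=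
  ms.foldl pvSeenStep s

-- "for photo in seen: photo_to_cluster_indices[photo].append(idx)" (defaultdict(list): append on the
-- entry with default [] is Dict.modify with default [])
def pvAppend (idx : Int) (d : PySem.Dict String (List Int)) (phs : List String) :
    PySem.Dict String (List Int) :=
  phs.foldl (fun d photo => d.modify photo [] (fun v => v ++ [idx])) d

-- one iteration of A's outer "for idx, cluster in enumerate(clusters)"
def pvStepA (d : PySem.Dict String (List Int))
    (p : Int × List (String × List (List (String × String)))) : PySem.Dict String (List Int) :=
  pvAppend p.1 d (pvSeenFrom PySem.Set.empty (pvMembers p.2))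

def pvDictA (clusters : List (List (String × List (List (String × String))))) :
    PySem.Dict String (List Int) :=
  (PySem.List.enumerate clusters 0).foldl pvStepA PySem.Dict.empty

-- one iteration of A's "for indices in photo_to_cluster_indices.values()"
def pvBucketA (pairs : PySem.Set (Int × Int)) (indices : List Int) : PySem.Set (Int × Int) :=
  if indices.length ≤ 1 then pairs
  else
    (pvCombs2 (PySem.List.sorted (PySem.Set.ofList indices) (fun x => x) false)).foldl
      (fun pairs pr => PySem.Set.add pairs pr) pairs

def build_cluster_cannot_link_pairs_py
    (clusters : List (List (String × List (List (String × String))))) : List (Int × Int) :=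
  if clusters.length ≤ 1 then []
  else
    (PySem.Dict.values (pvDictA clusters)).foldl pvBucketA PySem.Set.empty

-- ===== PORT B =====
-- "{p for p in (str(m.get('photo_relpath','')) for m in c.get('members',[])) if p}"
def pvPhotosOf (c : List (String × List (List (String × String)))) : PySem.Set String :=
  PySem.Set.ofList (((pvMembers c).map pvPhoto).filter (fun p => p != ""))

-- "all_photos = set(); for ps in cluster_photos: all_photos |= ps"
def pvAllPhotos (sets : List (PySem.Set String)) : PySem.Set String :=
  sets.foldl (fun s ps => PySem.Set.update s ps) PySem.Set.empty

-- "[i for i, ps in enumerate(cluster_photos) if photo in ps]"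
def pvHolders (sets : List (PySem.Set String)) (photo : String) : List Int :=
  ((PySem.List.enumerate sets 0).filter (fun q => PySem.Set.contains q.2 photo)).map (fun q => q.1)

-- "for a, left in enumerate(holders): for right in holders[a+1:]: pairs.add((left, right))"
def pvEmit (pairs : PySem.Set (Int × Int)) (holders : List Int) : PySem.Set (Int × Int) :=
  (PySem.List.enumerate holders 0).foldl
    (fun P q =>
      (PySem.List.slice holders (some (q.1 + 1)) none).foldl
        (fun P r => PySem.Set.add P (q.2, r)) P)
    pairs

def build_cluster_cannot_link_pairs_py_alt
    (clusters : List (List (String × List (List (String × String))))) : List (Int × Int) :=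
  let sets := clusters.map pvPhotosOf
  (pvAllPhotos sets).foldl (fun P photo => pvEmit P (pvHolders sets photo)) PySem.Set.empty

-- ===== PRECONDITION & SPEC =====
def Spec_build_cluster_cannot_link_pairs_py (clusters : List (List (String × List (List (String × String))))) (out : List (Int × Int)) : Prop := out = build_cluster_cannot_link_pairs_py_alt clusters
instance (clusters : List (List (String × List (List (String × String))))) (out : List (Int × Int)) : Decidable (Spec_build_cluster_cannot_link_pairs_py clusters out) := by unfold Spec_build_cluster_cannot_link_pairs_py; infer_instance

-- ===== CLAIM =====
def Claim_equal_build_cluster_cannot_link_pairs_py : Prop := ∀ (clusters : List (List (String × List (List (String × String))))), Dom_build_cluster_cannot_link_pairs_py clusters → Spec_build_cluster_cannot_link_pairs_py clusters (build_cluster_cannot_link_pairs_py clusters)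

-- ===== LEMMAS AND PROOFS =====

-- A's per-cluster seen-set loop computes exactly B's per-cluster set comprehension
theorem pvSeenFrom_eq_foldl (ms : List (List (String × String))) (s : PySem.Set String) :
    pvSeenFrom s ms = (((ms.map pvPhoto).filter (fun p => p != "")).foldl PySem.Set.add s) := by
  induction ms generalizing s with
  | nil => rfl
  | cons m ms ih =>
    show pvSeenFrom (pvSeenStep s m) ms = _
    rw [ih]
    unfold pvSeenStep
    by_cases hp : pvPhoto m = ""
    · simp [hp]
    · simp [hp]

theorem pvSeenFrom_eq_photosOf (c : List (String × List (List (String × String)))) :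
    pvSeenFrom PySem.Set.empty (pvMembers c) = pvPhotosOf c := by
  rw [pvSeenFrom_eq_foldl, pvPhotosOf, PySem.Set.ofList_eq_foldl]
  rfl

theorem pvPhotosOf_nodup (c : List (String × List (List (String × String)))) :
    (pvPhotosOf c).Nodup := PySem.Set.nodup_ofList _

-- de-duplicated filter: a Nodup list filtered for equality with p is [p] or []
theorem pvFilter_nodup (phs : List String) (p : String) (h : phs.Nodup) :
    phs.filter (fun x => x == p) = if p ∈ phs then [p] else [] := by
  induction phs with
  | nil => simp
  | cons a phs ih =>
    rcases List.nodup_cons.mp h with ⟨ha, hnd⟩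
    by_cases hap : a = p
    · subst hap
      simp [ih hnd, ha]
    · simp only [List.filter_cons, beq_iff_eq, hap, if_false, ih hnd, List.mem_cons]
      simp [Ne.symm hap]

-- the defaultdict append loop, on a Nodup photo list
theorem pvAppend_getD (idx : Int) (d : PySem.Dict String (List Int)) (phs : List String)
    (hnd : phs.Nodup) (p : String) :
    (pvAppend idx d phs).getD p [] = d.getD p [] ++ (if p ∈ phs then [idx] else []) := by
  unfold pvAppend
  have hmap : phs.foldl (fun d photo => d.modify photo [] (fun v => v ++ [idx])) d
      = (phs.map (fun ph => (ph, idx))).foldl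
          (fun d q => d.modify q.1 [] (fun v => v ++ [q.2])) d := by
    rw [List.foldl_map]
  rw [hmap, PySem.Dict.getD_foldl_modify_append]
  congr 1
  have hfm : (phs.map (fun ph => (ph, idx))).filter (fun q => q.1 == p)
      = (phs.filter (fun x => x == p)).map (fun ph => (ph, idx)) := by
    rw [List.filter_map]
    rfl
  rw [hfm, pvFilter_nodup phs p hnd]
  by_cases hp : p ∈ phs <;> simp [hp]

theorem pvAppend_keys (idx : Int) (d : PySem.Dict String (List Int)) (phs : List String) :
    (pvAppend idx d phs).keys = PySem.Set.update d.keys phs := by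
  unfold pvAppend
  exact PySem.Dict.keys_foldl_modify phs [] (fun _ _ v => v ++ [idx]) d

-- the whole index-building loop of A, characterised at one photo and on the keys
theorem pvDictA_fold_getD (cs : List (List (String × List (List (String × String)))))
    (s : Int) (d : PySem.Dict String (List Int)) (p : String) :
    ((PySem.List.enumerate cs s).foldl pvStepA d).getD p []
      = d.getD p []
        ++ (((PySem.List.enumerate cs s).filter
              (fun q => decide (p ∈ pvPhotosOf q.2))).map (fun q => q.1)) := by
  induction cs generalizing s d with
  | nil => simp [PySem.List.enumerate_nil]
  | cons c cs ih =>
    rw [PySem.List.enumerate_cons]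
    simp only [List.foldl_cons, List.filter_cons]
    have hstep : (pvStepA d (s, c)).getD p []
        = d.getD p [] ++ (if p ∈ pvPhotosOf c then [s] else []) := by
      show (pvAppend s d (pvSeenFrom PySem.Set.empty (pvMembers c))).getD p [] = _
      rw [pvSeenFrom_eq_photosOf]
      exact pvAppend_getD s d (pvPhotosOf c) (pvPhotosOf_nodup c) p
    rw [ih, hstep]
    by_cases hp : p ∈ pvPhotosOf c
    · simp [hp]
    · simp [hp]

theorem pvDictA_fold_keys (cs : List (List (String × List (List (String × String)))))
    (s : Int) (d : PySem.Dict String (List Int)) :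
    ((PySem.List.enumerate cs s).foldl pvStepA d).keys
      = (cs.map pvPhotosOf).foldl (fun k ps => PySem.Set.update k ps) d.keys := by
  induction cs generalizing s d with
  | nil => rfl
  | cons c cs ih =>
    rw [PySem.List.enumerate_cons]
    simp only [List.foldl_cons, List.map_cons]
    rw [ih]
    congr 1
    show (pvAppend s d (pvSeenFrom PySem.Set.empty (pvMembers c))).keys = _
    rw [pvSeenFrom_eq_photosOf]
    exact pvAppend_keys s d (pvPhotosOf c)

theorem pvDictA_keys (clusters : List (List (String × List (List (String × String))))) :
    (pvDictA clusters).keys = pvAllPhotos (clusters.map pvPhotosOf) := by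
  unfold pvDictA pvAllPhotos
  rw [pvDictA_fold_keys]
  rfl

theorem pvAllPhotos_nodup (sets : List (PySem.Set String)) : (pvAllPhotos sets).Nodup := by
  unfold pvAllPhotos
  have : ∀ (acc : PySem.Set String), acc.Nodup →
      (sets.foldl (fun s ps => PySem.Set.update s ps) acc).Nodup := by
    induction sets with
    | nil => intro acc hacc; exact hacc
    | cons x xs ih =>
      intro acc hacc
      exact ih _ (PySem.Set.nodup_update acc x hacc)
  exact this PySem.Set.empty List.nodup_nil

-- enumerate over a mapped list
theorem pvEnumerate_map {α β : Type} (f : α → β) (xs : List α) (s : Int) :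
    PySem.List.enumerate (xs.map f) s
      = (PySem.List.enumerate xs s).map (fun q => (q.1, f q.2)) := by
  induction xs generalizing s with
  | nil => rfl
  | cons x xs ih => simp [PySem.List.enumerate_cons, ih]

-- A's bucket at photo p IS B's holders list
theorem pvDictA_getD (clusters : List (List (String × List (List (String × String))))) (p : String) :
    (pvDictA clusters).getD p [] = pvHolders (clusters.map pvPhotosOf) p := by
  unfold pvDictA pvHolders
  rw [pvDictA_fold_getD, pvEnumerate_map]
  simp only [PySem.Dict.getD_empty, List.nil_append, List.filter_map, List.map_map]
  rw [List.filter_congr (fun q _ => ?_)]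
  · rfl
  · simp [Function.comp]

-- holders are strictly increasing (indices of a filtered enumerate)
theorem pvHolders_pairwise (sets : List (PySem.Set String)) (p : String) :
    (pvHolders sets p).Pairwise (· < ·) := by
  unfold pvHolders
  rw [List.pairwise_map]
  refine List.Pairwise.filter _ ?_
  have h := PySem.List.pairwise_lt_pyRange_one 0 (0 + (sets.length : Int))
  rw [← PySem.List.map_fst_enumerate sets 0, List.pairwise_map] at h
  exact h

-- B's pair-emission loop is a fold of combinations over the holders list
theorem pvEmit_eq_aux (xs whole : List Int) (k : ℕ) (hk : whole.drop k = xs)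
    (P : PySem.Set (Int × Int)) :
    (PySem.List.enumerate xs (k : Int)).foldl
      (fun P q =>
        (PySem.List.slice whole (some (q.1 + 1)) none).foldl
          (fun P r => PySem.Set.add P (q.2, r)) P) P
    = (pvCombs2 xs).foldl PySem.Set.add P := by
  induction xs generalizing k P with
  | nil => simp [pvCombs2]
  | cons x xs ih =>
    rw [PySem.List.enumerate_cons]
    simp only [List.foldl_cons]
    have hcast : ((k : Int) + 1) = (((k + 1 : ℕ)) : Int) := by push_cast; ring
    have hk' : whole.drop (k + 1) = xs := by
      have : whole.drop (k + 1) = List.drop 1 (whole.drop k) := by rw [List.drop_drop]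
      rw [this, hk]; simp
    have hslice : PySem.List.slice whole (some ((k : Int) + 1)) none = xs := by
      rw [hcast, PySem.List.slice_from_natCast, hk']
    simp only [pvCombs2, List.foldl_append, List.foldl_map]
    rw [hslice]
    have := ih (k + 1) hk' (xs.foldl (fun P r => PySem.Set.add P (x, r)) P)
    rw [← hcast] at this
    exact this

theorem pvEmit_combs (holders : List Int) (P : PySem.Set (Int × Int)) :
    pvEmit P holders = (pvCombs2 holders).foldl PySem.Set.add P :=
  pvEmit_eq_aux holders holders 0 rfl P

-- A's bucket body is the same fold of combinations, on a strictly increasing bucket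
theorem pvBucketA_combs (v : List Int) (hv : v.Pairwise (· < ·)) (P : PySem.Set (Int × Int)) :
    pvBucketA P v = (pvCombs2 v).foldl PySem.Set.add P := by
  have hnd : v.Nodup := hv.imp (fun h => ne_of_lt h)
  unfold pvBucketA
  by_cases hl : v.length ≤ 1
  · rw [if_pos hl]
    rcases v with _ | ⟨a, _ | ⟨b, t⟩⟩
    · simp [pvCombs2]
    · simp [pvCombs2]
    · simp at hl
  · rw [if_neg hl, PySem.Set.ofList_eq_self_of_nodup v hnd,
        PySem.List.sorted_eq_of_perm_of_pairwise_lt v v (fun x => x) (List.Perm.refl v) hv]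

theorem pvCombs2_short (v : List Int) (hlen : v.length ≤ 1) : pvCombs2 v = [] := by
  rcases v with _ | ⟨a, _ | ⟨b, t⟩⟩
  · rfl
  · simp [pvCombs2]
  · simp at hlen

-- the degenerate case: at most one cluster, so every holders list is short and B emits nothing
theorem pvAlt_short (clusters : List (List (String × List (List (String × String)))))
    (hlen : clusters.length ≤ 1) : build_cluster_cannot_link_pairs_py_alt clusters = [] := by
  unfold build_cluster_cannot_link_pairs_py_alt
  have hshort : ∀ p, (pvHolders (clusters.map pvPhotosOf) p).length ≤ 1 := by
    intro p
    unfold pvHolders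
    rw [List.length_map]
    calc ((PySem.List.enumerate (clusters.map pvPhotosOf) 0).filter
            (fun q => PySem.Set.contains q.2 p)).length
        ≤ (PySem.List.enumerate (clusters.map pvPhotosOf) 0).length := List.length_filter_le _ _
      _ ≤ 1 := by rw [PySem.List.length_enumerate, List.length_map]; exact hlen
  have : ∀ (ps : List String) (P : PySem.Set (Int × Int)),
      ps.foldl (fun P photo => pvEmit P (pvHolders (clusters.map pvPhotosOf) photo)) P = P := by
    intro ps
    induction ps with
    | nil => intro P; rfl
    | cons p ps ih =>
      intro P
      simp only [List.foldl_cons]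
      rw [pvEmit_combs, pvCombs2_short _ (hshort p), List.foldl_nil, ih]
  exact this _ _

-- ===== VERDICT (by name: the statement is the Claim_ definition above) =====
theorem build_cluster_cannot_link_pairs_py_spec : Claim_equal_build_cluster_cannot_link_pairs_py := by
  intro clusters _hdom
  unfold Spec_build_cluster_cannot_link_pairs_py
  unfold build_cluster_cannot_link_pairs_py
  by_cases hlen : clusters.length ≤ 1
  · rw [if_pos hlen, pvAlt_short clusters hlen]
  · rw [if_neg hlen]
    have hnodupkeys : (pvDictA clusters).keys.Nodup := by
      rw [pvDictA_keys]
      exact pvAllPhotos_nodup _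
    rw [PySem.Dict.values_eq_map_keys (pvDictA clusters) hnodupkeys [], List.foldl_map,
        pvDictA_keys]
    show (pvAllPhotos (clusters.map pvPhotosOf)).foldl
        (fun P k => pvBucketA P ((pvDictA clusters).getD k [])) PySem.Set.empty
      = build_cluster_cannot_link_pairs_py_alt clusters
    unfold build_cluster_cannot_link_pairs_py_alt
    refine PySem.List.foldl_congr_mem _ _ _ _ ?_
    intro P p _
    rw [pvDictA_getD, pvBucketA_combs _ (pvHolders_pairwise _ p), pvEmit_combs]
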